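-- pv_equiv track=rewrite | github.com/sarthaksiddha/Wireshark-mcp | wireshark_mcp/protocols/smtp.py | _analyze_response_codes
-- ===== SOURCE A (Python) =====
-- from typing import Dict, Any, List, Optional, Tuple
--
-- def _analyze_response_codes(transactions: List[Dict[str, Any]]) -> Dict[str, Any]:
--     """Analyze SMTP response code patterns."""
--     # Count response codes
--     response_codes = {}
--     error_messages = {}
--
--     for transaction in transactions:
--         for response in transaction.get('responses', []):
--             code = response.get('code')
--             message = response.get('parameter', '')
--
--             if code:
--                 response_codes[code] = response_codes.get(code, 0) + 1
--
--                 # Track error messages for 4xx and 5xx codes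
--                 if code.startswith(('4', '5')) and message:
--                     error_messages[message] = error_messages.get(message, 0) + 1
--
--     # Categorize response codes
--     categories = {
--         '2xx': 0,
--         '3xx': 0,
--         '4xx': 0,
--         '5xx': 0
--     }
--
--     for code, count in response_codes.items():
--         if code.startswith('2'):
--             categories['2xx'] += count
--         elif code.startswith('3'):
--             categories['3xx'] += count
--         elif code.startswith('4'):
--             categories['4xx'] += count
--         elif code.startswith('5'):
--             categories['5xx'] += count
--
--     # Get top error messages
--     top_errors = sorted(error_messages.items(), key=lambda x: x[1], reverse=True)[:5]
--
--     return {
--         'response_code_counts': response_codes,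
--         'response_categories': categories,
--         'top_error_messages': dict(top_errors)
--     }
-- ===== SOURCE B (Python) =====
-- def _analyze_response_codes(transactions):
--     """Analyze SMTP response code patterns (single fused pass with scalar category counters)."""
--     response_codes = {}
--     error_messages = {}
--     c2 = c3 = c4 = c5 = 0
--     for transaction in transactions:
--         for response in transaction.get('responses', []):
--             code = response.get('code')
--             message = response.get('parameter', '')
--             if code:
--                 response_codes[code] = response_codes.get(code, 0) + 1
--                 if code.startswith('2'):
--                     c2 += 1
--                 elif code.startswith('3'):
--                     c3 += 1
--                 elif code.startswith('4'):
--                     c4 += 1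
--                 elif code.startswith('5'):
--                     c5 += 1
--                 if code.startswith(('4', '5')) and message:
--                     error_messages[message] = error_messages.get(message, 0) + 1
--     top_errors = sorted(error_messages.items(), key=lambda x: x[1], reverse=True)[:5]
--     return {
--         'response_code_counts': response_codes,
--         'response_categories': {'2xx': c2, '3xx': c3, '4xx': c4, '5xx': c5},
--         'top_error_messages': dict(top_errors)
--     }
-- ===== Notes on version B (the rewrite author's own statement) =====
-- stated objective: simpler
-- what changed: Fuses categorization into the single pass over responses using four scalar counters bumped per response, eliminating A's second loop over the distinct-code counter dict.
import Mathlib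
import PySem

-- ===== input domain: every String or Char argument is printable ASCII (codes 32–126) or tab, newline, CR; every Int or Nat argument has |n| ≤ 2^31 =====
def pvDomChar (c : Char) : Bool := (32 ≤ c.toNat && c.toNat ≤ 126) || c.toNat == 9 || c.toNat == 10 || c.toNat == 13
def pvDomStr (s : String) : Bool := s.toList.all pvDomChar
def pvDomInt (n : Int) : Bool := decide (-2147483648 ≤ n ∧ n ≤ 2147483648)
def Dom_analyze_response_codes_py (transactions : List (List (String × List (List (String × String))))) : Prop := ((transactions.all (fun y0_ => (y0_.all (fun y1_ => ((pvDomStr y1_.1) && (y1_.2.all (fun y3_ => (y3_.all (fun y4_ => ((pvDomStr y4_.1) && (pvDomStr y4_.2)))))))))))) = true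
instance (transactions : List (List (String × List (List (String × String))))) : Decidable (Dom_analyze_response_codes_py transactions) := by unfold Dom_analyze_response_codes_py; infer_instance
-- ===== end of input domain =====

-- B fuses A's separate categorization pass over the distinct-code counter into the single
-- pass over responses, keeping four scalar category counters; same return value everywhere.

-- ===== PORT A =====
-- body of A's nested loop: update the two counter dicts for one response
def pvStepA (st : PySem.Dict String Int × PySem.Dict String Int)
    (response : List (String × String)) :
    PySem.Dict String Int × PySem.Dict String Int :=
  let code? := (PySem.Dict.mk response).get? "code"
  let message := (PySem.Dict.mk response).getD "parameter" ""
  match code? with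
  | none => st
  | some code =>
    if code == "" then st
    else
      let rc := st.1.insert code (st.1.getD code 0 + 1)
      let em :=
        if (PySem.Str.startswith code "4" || PySem.Str.startswith code "5") && !(message == "")
        then st.2.insert message (st.2.getD message 0 + 1)
        else st.2
      (rc, em)

-- body of A's second loop: add one (code, count) pair into the categories dict
def pvCatStep (cats : PySem.Dict String Int) (p : String × Int) : PySem.Dict String Int :=
  if PySem.Str.startswith p.1 "2" then cats.insert "2xx" (cats.getD "2xx" 0 + p.2)
  else if PySem.Str.startswith p.1 "3" then cats.insert "3xx" (cats.getD "3xx" 0 + p.2)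
  else if PySem.Str.startswith p.1 "4" then cats.insert "4xx" (cats.getD "4xx" 0 + p.2)
  else if PySem.Str.startswith p.1 "5" then cats.insert "5xx" (cats.getD "5xx" 0 + p.2)
  else cats

def analyze_response_codes_py (transactions : List (List (String × List (List (String × String))))) :
    List (String × List (String × Int)) :=
  let st := transactions.foldl
    (fun st tr => (((PySem.Dict.mk tr).get? "responses").getD []).foldl pvStepA st)
    (PySem.Dict.mk [], PySem.Dict.mk [])
  let cats := st.1.items.foldl pvCatStep
    (PySem.Dict.mk [("2xx", 0), ("3xx", 0), ("4xx", 0), ("5xx", 0)])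
  let top := PySem.List.slice (PySem.List.sorted st.2.items (fun x => x.2) true) none (some 5)
  let topd := top.foldl (fun d p => d.insert p.1 p.2) (PySem.Dict.mk ([] : List (String × Int)))
  [("response_code_counts", st.1.items),
   ("response_categories", cats.items),
   ("top_error_messages", topd.items)]

-- ===== PORT B =====
-- body of B's single fused loop: counter dicts plus the four scalar category counters
def pvStepB (st : PySem.Dict String Int × PySem.Dict String Int × Int × Int × Int × Int)
    (response : List (String × String)) :
    PySem.Dict String Int × PySem.Dict String Int × Int × Int × Int × Int :=
  let code? := (PySem.Dict.mk response).get? "code"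
  let message := (PySem.Dict.mk response).getD "parameter" ""
  match code? with
  | none => st
  | some code =>
    if code == "" then st
    else
      match st with
      | (rc, em, c2, c3, c4, c5) =>
        let rc := rc.insert code (rc.getD code 0 + 1)
        let cs :=
          if PySem.Str.startswith code "2" then (c2 + 1, c3, c4, c5)
          else if PySem.Str.startswith code "3" then (c2, c3 + 1, c4, c5)
          else if PySem.Str.startswith code "4" then (c2, c3, c4 + 1, c5)
          else if PySem.Str.startswith code "5" then (c2, c3, c4, c5 + 1)
          else (c2, c3, c4, c5)
        let em :=
          if (PySem.Str.startswith code "4" || PySem.Str.startswith code "5") && !(message == "")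
          then em.insert message (em.getD message 0 + 1)
          else em
        (rc, em, cs.1, cs.2.1, cs.2.2.1, cs.2.2.2)

def analyze_response_codes_py_alt (transactions : List (List (String × List (List (String × String))))) :
    List (String × List (String × Int)) :=
  let st := transactions.foldl
    (fun st tr => (((PySem.Dict.mk tr).get? "responses").getD []).foldl pvStepB st)
    (PySem.Dict.mk [], PySem.Dict.mk [], 0, 0, 0, 0)
  let top := PySem.List.slice (PySem.List.sorted st.2.1.items (fun x => x.2) true) none (some 5)
  let topd := top.foldl (fun d p => d.insert p.1 p.2) (PySem.Dict.mk ([] : List (String × Int)))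
  [("response_code_counts", st.1.items),
   ("response_categories",
     [("2xx", st.2.2.1), ("3xx", st.2.2.2.1), ("4xx", st.2.2.2.2.1), ("5xx", st.2.2.2.2.2)]),
   ("top_error_messages", topd.items)]

-- ===== PRECONDITION & SPEC =====
def Spec_analyze_response_codes_py (transactions : List (List (String × List (List (String × String))))) (out : List (String × List (String × Int))) : Prop := out = analyze_response_codes_py_alt transactions
instance (transactions : List (List (String × List (List (String × String))))) (out : List (String × List (String × Int))) : Decidable (Spec_analyze_response_codes_py transactions out) := by unfold Spec_analyze_response_codes_py; infer_instance

-- ===== CLAIM (what is proved, stated in full; the proofs are below) =====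
def Claim_equal_analyze_response_codes_py : Prop := ∀ (transactions : List (List (String × List (List (String × String))))), Dom_analyze_response_codes_py transactions → Spec_analyze_response_codes_py transactions (analyze_response_codes_py transactions)

-- ===== LEMMAS AND PROOFS =====

-- chain predicates of the if/elif category dispatch
def pvQ2 (c : String) : Bool := PySem.Str.startswith c "2"
def pvQ3 (c : String) : Bool := !PySem.Str.startswith c "2" && PySem.Str.startswith c "3"
def pvQ4 (c : String) : Bool :=
  !PySem.Str.startswith c "2" && !PySem.Str.startswith c "3" && PySem.Str.startswith c "4"
def pvQ5 (c : String) : Bool :=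
  !PySem.Str.startswith c "2" && !PySem.Str.startswith c "3" && !PySem.Str.startswith c "4" &&
    PySem.Str.startswith c "5"

-- weighted count of an association list under a predicate on the key
def pvW (p : String → Bool) (l : List (String × Int)) : Int :=
  (l.map (fun q => if p q.1 then q.2 else 0)).sum

theorem pvW_replace (p : String → Bool) (c : String) (v : Int) (l : List (String × Int))
    (hnd : (l.map Prod.fst).Nodup) (hmem : (c, v) ∈ l) :
    pvW p (l.map (fun q => if q.1 == c then (c, v + 1) else q)) =
      pvW p l + (if p c then 1 else 0) := by
  induction l with
  | nil => simp at hmem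
  | cons q t ih =>
    simp only [List.map_cons, List.nodup_cons] at hnd
    rcases List.mem_cons.mp hmem with h | h
    · subst h
      have ht : t.map (fun q => if q.1 == c then (c, v + 1) else q) = t := by
        conv_rhs => rw [← List.map_id t]
        apply List.map_congr_left
        intro x hx
        have hxc : x.1 ≠ c := by
          intro hcq
          exact hnd.1 (by simpa [hcq] using List.mem_map_of_mem (f := Prod.fst) hx)
        simp [hxc]
      simp only [List.map_cons, ht]
      simp [pvW]
      split <;> ring
    · have hne : q.1 ≠ c := by
        intro hc
        exact hnd.1 (by simpa [hc] using List.mem_map_of_mem (f := Prod.fst) h)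
      have := ih hnd.2 h
      simp only [List.map_cons, hne, beq_iff_eq]
      simp [pvW] at this ⊢
      omega

theorem pvW_insert (p : String → Bool) (d : PySem.Dict String Int) (c : String)
    (hnd : d.keys.Nodup) :
    pvW p ((d.insert c (d.getD c 0 + 1)).items) = pvW p d.items + (if p c then 1 else 0) := by
  by_cases h : d.contains c = true
  · obtain ⟨v, hv⟩ : ∃ v, d.get? c = some v := by
      rw [PySem.Dict.contains_eq_isSome_get?] at h
      exact Option.isSome_iff_exists.mp h
    have hgd : d.getD c 0 = v := PySem.Dict.getD_of_get?_eq_some d 0 hv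
    have hmem : (c, v) ∈ d.items := PySem.Dict.mem_items_of_get?_eq_some d hv
    have hnd' : (d.items.map Prod.fst).Nodup := hnd
    rw [PySem.Dict.items_insert, if_pos h, hgd]
    exact pvW_replace p c v d.items hnd' hmem
  · have hgd : d.getD c 0 = 0 := PySem.Dict.getD_of_not_contains d 0 (by simpa using h)
    rw [PySem.Dict.items_insert, if_neg h, hgd]
    simp [pvW]

-- the invariant: the B-fold is the A-fold plus the four weighted counts of the code counter
theorem pvInv (L : List (List (String × String))) :
    ∀ (rc em : PySem.Dict String Int), rc.keys.Nodup →
    (L.foldl pvStepB (rc, em, pvW pvQ2 rc.items, pvW pvQ3 rc.items, pvW pvQ4 rc.items,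
        pvW pvQ5 rc.items) =
      ((L.foldl pvStepA (rc, em)).1, (L.foldl pvStepA (rc, em)).2,
        pvW pvQ2 (L.foldl pvStepA (rc, em)).1.items,
        pvW pvQ3 (L.foldl pvStepA (rc, em)).1.items,
        pvW pvQ4 (L.foldl pvStepA (rc, em)).1.items,
        pvW pvQ5 (L.foldl pvStepA (rc, em)).1.items)) ∧
      (L.foldl pvStepA (rc, em)).1.keys.Nodup := by
  induction L with
  | nil => intro rc em hnd; exact ⟨rfl, hnd⟩
  | cons r t ih =>
    intro rc em hnd
    simp only [List.foldl_cons]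
    rcases hc : (PySem.Dict.mk r).get? "code" with _ | code
    · have hA : pvStepA (rc, em) r = (rc, em) := by simp [pvStepA, hc]
      have hB : pvStepB (rc, em, pvW pvQ2 rc.items, pvW pvQ3 rc.items, pvW pvQ4 rc.items,
          pvW pvQ5 rc.items) r = (rc, em, pvW pvQ2 rc.items, pvW pvQ3 rc.items,
          pvW pvQ4 rc.items, pvW pvQ5 rc.items) := by simp [pvStepB, hc]
      rw [hA, hB]; exact ih rc em hnd
    · by_cases hce : code = ""
      · have hA : pvStepA (rc, em) r = (rc, em) := by simp [pvStepA, hc, hce]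
        have hB : pvStepB (rc, em, pvW pvQ2 rc.items, pvW pvQ3 rc.items, pvW pvQ4 rc.items,
            pvW pvQ5 rc.items) r = (rc, em, pvW pvQ2 rc.items, pvW pvQ3 rc.items,
            pvW pvQ4 rc.items, pvW pvQ5 rc.items) := by simp [pvStepB, hc, hce]
        rw [hA, hB]; exact ih rc em hnd
      · set rc' := rc.insert code (rc.getD code 0 + 1) with hrc'
        set em' :=
          if (PySem.Str.startswith code "4" || PySem.Str.startswith code "5") &&
              !((PySem.Dict.mk r).getD "parameter" "" == "")
          then em.insert ((PySem.Dict.mk r).getD "parameter" "")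
            (em.getD ((PySem.Dict.mk r).getD "parameter" "") 0 + 1)
          else em with hem'
        have hnd' : rc'.keys.Nodup := PySem.Dict.nodup_keys_insert rc code _ hnd
        have hA : pvStepA (rc, em) r = (rc', em') := by
          simp [pvStepA, hc, hce, hrc', hem']
        have hw2 := pvW_insert pvQ2 rc code hnd
        have hw3 := pvW_insert pvQ3 rc code hnd
        have hw4 := pvW_insert pvQ4 rc code hnd
        have hw5 := pvW_insert pvQ5 rc code hnd
        have hB : pvStepB (rc, em, pvW pvQ2 rc.items, pvW pvQ3 rc.items, pvW pvQ4 rc.items,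
            pvW pvQ5 rc.items) r =
            (rc', em', pvW pvQ2 rc'.items, pvW pvQ3 rc'.items, pvW pvQ4 rc'.items,
              pvW pvQ5 rc'.items) := by
          rw [← hrc'] at hw2 hw3 hw4 hw5
          simp only [pvStepB, hc, hce, beq_iff_eq, hrc', hem']
          rw [hw2, hw3, hw4, hw5]
          simp only [pvQ2, pvQ3, pvQ4, pvQ5]
          clear ih hA hnd hnd' hw2 hw3 hw4 hw5 hc hce hem' hrc'
          split_ifs <;> simp_all
        rw [hA, hB]
        exact ih rc' em' hnd'

-- A's categorization fold over any association list, from the literal four-key dict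
theorem pvCatFold (l : List (String × Int)) :
    ∀ (a b c e : Int),
      l.foldl pvCatStep (PySem.Dict.mk [("2xx", a), ("3xx", b), ("4xx", c), ("5xx", e)]) =
        PySem.Dict.mk [("2xx", a + pvW pvQ2 l), ("3xx", b + pvW pvQ3 l),
          ("4xx", c + pvW pvQ4 l), ("5xx", e + pvW pvQ5 l)] := by
  induction l with
  | nil => intro a b c e; simp [pvW]
  | cons q t ih =>
    intro a b c e
    have hstep : pvCatStep (PySem.Dict.mk [("2xx", a), ("3xx", b), ("4xx", c), ("5xx", e)]) q =
        PySem.Dict.mk [("2xx", a + if pvQ2 q.1 then q.2 else 0),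
          ("3xx", b + if pvQ3 q.1 then q.2 else 0),
          ("4xx", c + if pvQ4 q.1 then q.2 else 0),
          ("5xx", e + if pvQ5 q.1 then q.2 else 0)] := by
      simp only [pvCatStep, pvQ2, pvQ3, pvQ4, pvQ5]
      split_ifs <;> simp_all [PySem.Dict.insert, PySem.Dict.contains,
                PySem.Dict.getD, PySem.Dict.get?]
    simp only [List.foldl_cons, hstep, ih]
    simp [pvW]
    refine ⟨by ring, by ring, by ring, by ring⟩

-- ===== VERDICT (by name: the statement is the Claim_ definition above) =====
theorem analyze_response_codes_py_spec : Claim_equal_analyze_response_codes_py := by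
  intro transactions _
  show analyze_response_codes_py transactions = analyze_response_codes_py_alt transactions
  unfold analyze_response_codes_py analyze_response_codes_py_alt
  have hflat : ∀ {σ : Type} (f : σ → List (String × String) → σ) (init : σ),
      transactions.foldl
        (fun st tr => (((PySem.Dict.mk tr).get? "responses").getD []).foldl f st) init =
      ((transactions.map (fun tr => ((PySem.Dict.mk tr).get? "responses").getD [])).flatten).foldl
        f init := by
    intro σ f init
    rw [List.foldl_flatten, List.foldl_map]
  rw [hflat pvStepA, hflat pvStepB]
  set L := (transactions.map (fun tr => ((PySem.Dict.mk tr).get? "responses").getD [])).flatten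
  have h0 : (PySem.Dict.mk ([] : List (String × Int))).keys.Nodup := by
    simp [PySem.Dict.keys]
  have hinv := pvInv L (PySem.Dict.mk []) (PySem.Dict.mk []) h0
  have hW0 : ∀ p, pvW p (PySem.Dict.mk ([] : List (String × Int))).items = 0 := fun _ => rfl
  rw [hW0, hW0, hW0, hW0] at hinv
  rw [hinv.1]
  have hcat := pvCatFold (L.foldl pvStepA (PySem.Dict.mk [], PySem.Dict.mk [])).1.items 0 0 0 0
  simp only [hcat]
  simp
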